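-- pv_equiv track=rewrite | github.com/Hongze-Wang/TargetOffer | 拼多多2020校招部分编程题合集3.py | get_sub_treenum
-- ===== SOURCE A (Python) =====
-- count_dict = {}
--
-- def get_sub_treenum(n, m):
--     if (n, m) in count_dict.keys():
--         return count_dict[(n, m)]
--     elif n == 0:
--         count_dict[(n, m)] = m
--     elif m == 0:
--         count_dict[(n, m)] = n
--     else:
--         count_dict[(n, m)] = get_sub_treenum(n-1, m) + get_sub_treenum(n, m-1) + 2
--     return count_dict[(n, m)]
-- ===== SOURCE B (Python) =====
-- def get_sub_treenum(n, m):
--     # Closed form: f(n, m) = C(n+m+2, n+1) - 2 for n, m >= 0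
--     # (substituting g = f + 2 turns the recurrence into Pascal's rule).
--     if n == 0:
--         return m
--     if m == 0:
--         return n
--     k = min(n, m) + 1          # compute C(n+m+2, k) via the shorter side
--     s = n + m + 2 - k
--     num = 1
--     for i in range(1, k + 1):  # exact: each partial product is C(s+i, i)
--         num = num * (s + i) // i
--     return num - 2
-- ===== Notes on version B (the rewrite author's own statement) =====
-- stated objective: faster
-- what changed: Replaces the memoized O(n*m) recursion by the closed form f(n,m) = C(n+m+2, n+1) - 2, computed as a product over min(n,m)+1 factors.
import Mathlib
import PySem

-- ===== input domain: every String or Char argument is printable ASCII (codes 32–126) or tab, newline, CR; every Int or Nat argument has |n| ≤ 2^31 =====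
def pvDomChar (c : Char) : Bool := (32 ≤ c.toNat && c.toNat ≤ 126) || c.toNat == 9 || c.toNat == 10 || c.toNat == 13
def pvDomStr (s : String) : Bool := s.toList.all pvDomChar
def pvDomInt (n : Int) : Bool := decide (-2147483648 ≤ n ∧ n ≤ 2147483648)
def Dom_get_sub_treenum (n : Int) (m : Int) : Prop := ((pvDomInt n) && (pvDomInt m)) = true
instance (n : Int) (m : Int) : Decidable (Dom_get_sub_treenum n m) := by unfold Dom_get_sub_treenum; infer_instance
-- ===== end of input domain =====

-- B replaces A's memoized O(n*m) recursion by the closed form C(n+m+2, n+1) - 2 computed as a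
-- short product (objective: faster). A also mutates the module-level memo dict count_dict; the
-- equivalence proved here is about the return value only.

-- ===== PORT A =====
-- A's memoized recursion; the global dict is threaded through explicitly, fuel only makes the
-- recursion total (it is sufficient whenever the Python recursion terminates).
def goA (fuel : Nat) (n m : Int) (d : PySem.Dict (Int × Int) Int) :
    PySem.Dict (Int × Int) Int × Int :=
  match fuel with
  | 0 => (d, 0)
  | Nat.succ fuel =>
    match d.get? (n, m) with
    | some v => (d, v)
    | none =>
      if n = 0 then (d.insert (n, m) m, m)
      else if m = 0 then (d.insert (n, m) n, n)
      else
        let r1 := goA fuel (n - 1) m d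
        let r2 := goA fuel n (m - 1) r1.1
        let v := r1.2 + r2.2 + 2
        (r2.1.insert (n, m) v, v)

def get_sub_treenum (n : Int) (m : Int) : Int :=
  (goA (n.toNat + m.toNat + 1) n m PySem.Dict.empty).2

-- ===== PORT B =====
def get_sub_treenum_alt (n : Int) (m : Int) : Int :=
  if n = 0 then m
  else if m = 0 then n
  else
    let k := min n m + 1
    let s := n + m + 2 - k
    let num := (PySem.List.pyRange 1 (k + 1) 1).foldl
      (fun num i => PySem.Int.floordiv (num * (s + i)) i) 1
    num - 2

-- ===== PRECONDITION & SPEC =====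
-- Pre_ excludes the inputs with a negative coordinate and the other one nonzero: there A's
-- recursion never reaches a base case and raises RecursionError.
def Pre_get_sub_treenum (n : Int) (m : Int) : Prop := (0 ≤ n ∧ 0 ≤ m) ∨ n = 0 ∨ m = 0
instance (n : Int) (m : Int) : Decidable (Pre_get_sub_treenum n m) := by
  unfold Pre_get_sub_treenum; infer_instance

def pvWitness_get_sub_treenum : Int × Int := (3, 4)

def Spec_get_sub_treenum (n : Int) (m : Int) (out : Int) : Prop := out = get_sub_treenum_alt n m
instance (n : Int) (m : Int) (out : Int) : Decidable (Spec_get_sub_treenum n m out) := by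
  unfold Spec_get_sub_treenum; infer_instance

-- ===== CLAIM (what is proved, stated in full; the proofs are below) =====
def Claim_equal_get_sub_treenum : Prop := ∀ (n : Int) (m : Int), Dom_get_sub_treenum n m →
  Pre_get_sub_treenum n m → Spec_get_sub_treenum n m (get_sub_treenum n m)

-- ===== LEMMAS AND PROOFS =====

-- the common mathematical value: C(n+m+2, n+1) - 2 (for 0 ≤ n, 0 ≤ m)
def F (n m : Int) : Int := (Nat.choose (n.toNat + m.toNat + 2) (n.toNat + 1) : Int) - 2

-- every entry of the memo dict is a correct value on nonnegative arguments
def DictOK (d : PySem.Dict (Int × Int) Int) : Prop :=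
  ∀ a b v, d.get? (a, b) = some v → 0 ≤ a ∧ 0 ≤ b ∧ v = F a b

theorem goA_correct : ∀ (fuel : Nat) (n m : Int) (d : PySem.Dict (Int × Int) Int),
    0 ≤ n → 0 ≤ m → n.toNat + m.toNat < fuel → DictOK d →
    DictOK (goA fuel n m d).1 ∧ (goA fuel n m d).2 = F n m := by
  intro fuel
  induction fuel with
  | zero => intro n m d _ _ hlt _; omega
  | succ fuel ih =>
    intro n m d hn hm hlt hd
    rcases hget : d.get? (n, m) with _ | v
    · by_cases hn0 : n = 0
      · subst hn0
        have hF : F 0 m = m := by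
          simp [F, Nat.choose_one_right]; omega
        refine ⟨?_, by simp [goA, hget, hF]⟩
        have hstep : (goA (Nat.succ fuel) 0 m d).1 = d.insert (0, m) m := by
          simp [goA, hget]
        rw [hstep]
        intro a b v hv
        rw [PySem.Dict.get?_insert] at hv
        split_ifs at hv with he
        · obtain ⟨ha, hb⟩ := Prod.mk.injEq .. ▸ he
          cases hv
          exact ⟨by omega, by omega, by rw [ha, hb, hF]⟩
        · exact hd a b v hv
      · by_cases hm0 : m = 0
        · subst hm0
          have hF : F n 0 = n := by
            have h1 : (1 : Nat) ≤ n.toNat + 2 := by omega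
            have := Nat.choose_symm (n := n.toNat + 2) (k := 1) (by omega)
            have h2 : n.toNat + 2 - 1 = n.toNat + 1 := by omega
            rw [h2] at this
            simp [F]; omega
          refine ⟨?_, by simp [goA, hget, hn0, hF]⟩
          have hstep : (goA (Nat.succ fuel) n 0 d).1 = d.insert (n, 0) n := by
            simp [goA, hget, hn0]
          rw [hstep]
          intro a b v hv
          rw [PySem.Dict.get?_insert] at hv
          split_ifs at hv with he
          · obtain ⟨ha, hb⟩ := Prod.mk.injEq .. ▸ he
            cases hv
            exact ⟨by omega, by omega, by rw [ha, hb, hF]⟩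
          · exact hd a b v hv
        · have hn1 : 1 ≤ n := by omega
          have hm1 : 1 ≤ m := by omega
          have h1 := ih (n - 1) m d (by omega) hm (by omega) hd
          have h2 := ih n (m - 1) (goA fuel (n - 1) m d).1 hn (by omega) (by omega) h1.1
          have hpascal : F (n - 1) m + F n (m - 1) + 2 = F n m := by
            have ha : (n - 1).toNat = n.toNat - 1 := by omega
            have hb : (m - 1).toNat = m.toNat - 1 := by omega
            have ha1 : 1 ≤ n.toNat := by omega
            have hb1 : 1 ≤ m.toNat := by omega
            have e1 : n.toNat - 1 + m.toNat + 2 = n.toNat + m.toNat + 1 := by omega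
            have e2 : n.toNat - 1 + 1 = n.toNat := by omega
            have e3 : n.toNat + (m.toNat - 1) + 2 = n.toNat + m.toNat + 1 := by omega
            simp only [F, ha, hb, e1, e2, e3]
            have := Nat.choose_succ_succ (n.toNat + m.toNat + 1) n.toNat
            push_cast [this]
            ring
          refine ⟨?_, ?_⟩
          · simp only [goA, hget, if_neg hn0, if_neg hm0]
            intro a b v hv
            rw [PySem.Dict.get?_insert] at hv
            split_ifs at hv with he
            · obtain ⟨ha, hb⟩ := Prod.mk.injEq .. ▸ he
              cases hv
              exact ⟨by omega, by omega, by rw [ha, hb, ← hpascal, h1.2, h2.2]⟩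
            · exact h2.1 a b v hv
          · simp only [goA, hget, if_neg hn0, if_neg hm0]
            rw [h1.2, h2.2]; exact hpascal
    · obtain ⟨_, _, hv⟩ := hd n m v hget
      exact ⟨by simp [goA, hget]; exact hd, by simp [goA, hget, hv]⟩

-- the partial products of B's loop are binomial coefficients: after k steps, C(s+k, k)
theorem binom_prod : ∀ (k : Nat) (s : Int), 0 ≤ s →
    (PySem.List.pyRange 1 ((k : Int) + 1) 1).foldl
      (fun num i => PySem.Int.floordiv (num * (s + i)) i) 1
      = (Nat.choose (s.toNat + k) k : Int) := by
  intro k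
  induction k with
  | zero =>
    intro s hs
    simp
  | succ k ih =>
    intro s hs
    have hr : PySem.List.pyRange 1 ((k : Int) + 1 + 1) 1
        = PySem.List.pyRange 1 ((k : Int) + 1) 1 ++ [(k : Int) + 1] :=
      PySem.List.pyRange_one_succ_right (by omega)
    push_cast
    rw [hr, List.foldl_append, ih s hs]
    simp only [List.foldl_cons, List.foldl_nil]
    have h1 : (Nat.choose (s.toNat + k) k : Int) * (s + ((k : Int) + 1))
        = ((Nat.choose (s.toNat + k) k * (s.toNat + k + 1) : Nat) : Int) := by
      push_cast [Int.toNat_of_nonneg hs]; ring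
    have h2 : (k : Int) + 1 = ((k + 1 : Nat) : Int) := by push_cast; ring
    rw [h1, h2, PySem.Int.floordiv_natCast]
    have h3 : Nat.choose (s.toNat + k) k * (s.toNat + k + 1)
        = Nat.choose (s.toNat + k + 1) (k + 1) * (k + 1) := by
      have h := Nat.add_one_mul_choose_eq (s.toNat + k) k
      simpa [Nat.mul_comm] using h
    rw [h3, Nat.mul_div_cancel _ (by omega : 0 < k + 1)]
    ring_nf

theorem alt_eq_F (n m : Int) (hn : 0 ≤ n) (hm : 0 ≤ m) : get_sub_treenum_alt n m = F n m := by
  by_cases hn0 : n = 0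
  · subst hn0
    simp [get_sub_treenum_alt, F, Nat.choose_one_right]
    omega
  · by_cases hm0 : m = 0
    · subst hm0
      simp [get_sub_treenum_alt, hn0, F]
      omega
    · have hn1 : 1 ≤ n := by omega
      have hm1 : 1 ≤ m := by omega
      simp only [get_sub_treenum_alt, if_neg hn0, if_neg hm0]
      have hmin : (min n m).toNat = min n.toNat m.toNat := by omega
      have hk : min n m + 1 = (((min n m).toNat + 1 : Nat) : Int) := by push_cast; omega
      have hs : (0 : Int) ≤ n + m + 2 - (min n m + 1) := by omega
      rw [hk]
      have hprod := binom_prod ((min n m).toNat + 1) (n + m + 2 - (((min n m).toNat + 1 : Nat) : Int))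
        (by push_cast; omega)
      rw [hprod]
      have harg : (n + m + 2 - (((min n m).toNat + 1 : Nat) : Int)).toNat + ((min n m).toNat + 1)
          = n.toNat + m.toNat + 2 := by push_cast; omega
      rw [harg, F]
      have hcase : Nat.choose (n.toNat + m.toNat + 2) ((min n m).toNat + 1)
          = Nat.choose (n.toNat + m.toNat + 2) (n.toNat + 1) := by
        rcases le_total n.toNat m.toNat with h | h
        · rw [hmin, min_eq_left h]
        · rw [hmin, min_eq_right h]
          have hsym := Nat.choose_symm (n := n.toNat + m.toNat + 2) (k := n.toNat + 1) (by omega)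
          have he : n.toNat + m.toNat + 2 - (n.toNat + 1) = m.toNat + 1 := by omega
          rw [he] at hsym
          exact hsym
      rw [hcase]

-- ===== VERDICT (by name: the statement is the Claim_ definition above) =====
theorem get_sub_treenum_spec : Claim_equal_get_sub_treenum := by
  intro n m _ hpre
  unfold Spec_get_sub_treenum
  by_cases hn0 : n = 0
  · subst hn0
    have hA : get_sub_treenum 0 m = m := by
      simp [get_sub_treenum, goA, PySem.Dict.get?_empty]
    have hB : get_sub_treenum_alt 0 m = m := by
      simp [get_sub_treenum_alt]
    rw [hA, hB]
  · by_cases hm0 : m = 0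
    · subst hm0
      have hA : get_sub_treenum n 0 = n := by
        simp [get_sub_treenum, goA, PySem.Dict.get?_empty, hn0]
      have hB : get_sub_treenum_alt n 0 = n := by
        simp [get_sub_treenum_alt, hn0]
      rw [hA, hB]
    · rcases hpre with ⟨hn, hm⟩ | hn' | hm'
      · have hempty : DictOK PySem.Dict.empty := by
          intro a b v hv
          simp [PySem.Dict.get?_empty] at hv
        have h := goA_correct (n.toNat + m.toNat + 1) n m PySem.Dict.empty hn hm (by omega) hempty
        unfold get_sub_treenum
        rw [h.2, alt_eq_F n m hn hm]
      · exact absurd hn' hn0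
      · exact absurd hm' hm0
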